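-- pv_equiv track=rewrite | github.com/Bricscoin2026/Bricscoin | backend/stark_engine.py | poly_sub
-- ===== SOURCE A (Python) =====
-- from typing import List, Tuple, Optional
--
-- FIELD_PRIME = 3 * (1 << 30) + 1
--
-- def f_add(a: int, b: int) -> int:
--     return (a + b) % FIELD_PRIME
--
-- def f_sub(a: int, b: int) -> int:
--     return (a - b) % FIELD_PRIME
--
-- def poly_sub(a: List[int], b: List[int]) -> List[int]:
--     """Subtract polynomial b from a."""
--     size = max(len(a), len(b))
--     result = [0] * size
--     for i in range(len(a)):
--         result[i] = f_add(result[i], a[i])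
--     for i in range(len(b)):
--         result[i] = f_sub(result[i], b[i])
--     return result
-- ===== SOURCE B (Python) =====
-- FIELD_PRIME = 3 * (1 << 30) + 1
--
-- def poly_sub(a, b):
--     """Subtract polynomial b from a."""
--     la, lb = len(a), len(b)
--     return [((a[i] if i < la else 0) - (b[i] if i < lb else 0)) % FIELD_PRIME
--             for i in range(max(la, lb))]
-- ===== Notes on version B (the rewrite author's own statement) =====
-- stated objective: faster
-- what changed: Replaced the zero-initialized mutable array updated by two sequential index loops (with two function calls per index) with a single list comprehension over aligned 0-padded coefficient pairs, computing each coefficient directly as (x - y) % FIELD_PRIME; correctness rests on ((x % p) - y) % p == (x - y) % p.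
import Mathlib
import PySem

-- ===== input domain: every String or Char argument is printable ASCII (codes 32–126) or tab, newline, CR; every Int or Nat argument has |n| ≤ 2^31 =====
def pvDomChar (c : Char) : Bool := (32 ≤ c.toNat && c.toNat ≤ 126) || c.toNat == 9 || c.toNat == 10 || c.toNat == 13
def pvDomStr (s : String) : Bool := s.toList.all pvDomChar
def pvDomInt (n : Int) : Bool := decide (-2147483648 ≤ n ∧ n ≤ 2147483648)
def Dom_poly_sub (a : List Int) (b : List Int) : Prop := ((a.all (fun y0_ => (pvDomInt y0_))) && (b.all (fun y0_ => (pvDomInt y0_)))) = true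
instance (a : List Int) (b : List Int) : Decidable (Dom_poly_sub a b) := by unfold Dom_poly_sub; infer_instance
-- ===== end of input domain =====

-- B replaces A's zero-initialized array mutated by two index loops with one direct
-- map over aligned (0-padded) coefficient pairs, one mod per index instead of two calls
-- (objective: faster; measured constant-factor).


-- ===== PORT A =====
def FIELD_PRIME : Int := 3 * (1 <<< 30) + 1

def f_add (a : Int) (b : Int) : Int := PySem.Int.mod (a + b) FIELD_PRIME

def f_sub (a : Int) (b : Int) : Int := PySem.Int.mod (a - b) FIELD_PRIME

def poly_sub (a : List Int) (b : List Int) : List Int :=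
  let size := max a.length b.length
  let result := List.replicate size (0 : Int)
  -- for i in range(len(a)): result[i] = f_add(result[i], a[i])   (indices in range, so getD is exact)
  let result := (List.range a.length).foldl
    (fun r i => r.set i (f_add (r.getD i 0) (a.getD i 0))) result
  -- for i in range(len(b)): result[i] = f_sub(result[i], b[i])
  (List.range b.length).foldl
    (fun r i => r.set i (f_sub (r.getD i 0) (b.getD i 0))) result

-- ===== PORT B =====
def poly_sub_alt (a : List Int) (b : List Int) : List Int :=
  let la := a.length
  let lb := b.length
  (List.range (max la lb)).map
    (fun i => PySem.Int.mod ((if i < la then a.getD i 0 else 0) - (if i < lb then b.getD i 0 else 0)) FIELD_PRIME)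

-- ===== PRECONDITION & SPEC =====
def Spec_poly_sub (a : List Int) (b : List Int) (out : List Int) : Prop := out = poly_sub_alt a b
instance (a : List Int) (b : List Int) (out : List Int) : Decidable (Spec_poly_sub a b out) := by unfold Spec_poly_sub; infer_instance

-- ===== CLAIM (what is proved, stated in full; the proofs are below) =====
def Claim_equal_poly_sub : Prop := ∀ (a : List Int) (b : List Int), Dom_poly_sub a b → Spec_poly_sub a b (poly_sub a b)

-- ===== LEMMAS AND PROOFS =====

-- the fold over range n sets each index once; length is preserved
theorem foldl_set_length (g : Nat → Int → Int) (r : List Int) (n : Nat) :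
    ((List.range n).foldl (fun r i => r.set i (g i (r.getD i 0))) r).length = r.length := by
  induction n generalizing r with
  | zero => simp
  | succ m ih =>
    rw [List.range_succ, List.foldl_append, List.foldl_cons, List.foldl_nil,
      List.length_set]
    exact ih r

-- characterization of the fold: index j holds g j (old value) for j < n, the old value otherwise
theorem foldl_set_getD (g : Nat → Int → Int) (r : List Int) (n : Nat) (hn : n ≤ r.length) (j : Nat) :
    ((List.range n).foldl (fun r i => r.set i (g i (r.getD i 0))) r).getD j 0
      = if j < n then g j (r.getD j 0) else r.getD j 0 := by
  induction n generalizing j with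
  | zero => simp
  | succ m ih =>
    have hm : m ≤ r.length := Nat.le_of_succ_le hn
    have hlen := foldl_set_length g r m
    simp only [List.range_succ, List.foldl_append, List.foldl_cons, List.foldl_nil]
    have hmm : ((List.range m).foldl (fun r i => r.set i (g i (r.getD i 0))) r).getD m 0
        = r.getD m 0 := by
      rw [ih hm m]; simp
    rw [hmm]
    rcases Nat.lt_trichotomy j m with h | h | h
    · rw [List.getD_eq_getElem?_getD, List.getElem?_set_ne (by omega),
        ← List.getD_eq_getElem?_getD, ih hm j]
      rw [if_pos h, if_pos (by omega : j < m + 1)]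
    · subst h
      rw [List.getD_eq_getElem?_getD, List.getElem?_set_self (by omega)]
      simp
    · rw [List.getD_eq_getElem?_getD, List.getElem?_set_ne (by omega),
        ← List.getD_eq_getElem?_getD, ih hm j]
      rw [if_neg (by omega : ¬ j < m), if_neg (by omega : ¬ j < m + 1)]

theorem mod_sub_left (x y : Int) : PySem.Int.mod (PySem.Int.mod x FIELD_PRIME - y) FIELD_PRIME
    = PySem.Int.mod (x - y) FIELD_PRIME := by
  have hp : (0 : Int) < FIELD_PRIME := by decide
  simp only [PySem.Int.mod_eq_emod_of_pos hp]
  conv_lhs => rw [Int.sub_emod]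
  conv_rhs => rw [Int.sub_emod]
  rw [Int.emod_emod_of_dvd _ dvd_rfl]

-- ===== VERDICT (by name: the statement is the Claim_ definition above) =====
theorem poly_sub_spec : Claim_equal_poly_sub := by
  intro a b _
  unfold Spec_poly_sub
  set la := a.length with hla'
  set lb := b.length with hlb'
  set g1 : Nat → Int → Int := fun i v => f_add v (a.getD i 0) with hg1
  set g2 : Nat → Int → Int := fun i v => f_sub v (b.getD i 0) with hg2
  have hA : poly_sub a b = (List.range lb).foldl
      (fun r i => r.set i (g2 i (r.getD i 0)))
      ((List.range la).foldl
        (fun r i => r.set i (g1 i (r.getD i 0)))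
        (List.replicate (max la lb) (0 : Int))) := rfl
  have hB : poly_sub_alt a b = (List.range (max la lb)).map
      (fun i => PySem.Int.mod ((if i < la then a.getD i 0 else 0)
        - (if i < lb then b.getD i 0 else 0)) FIELD_PRIME) := rfl
  rw [hA, hB]
  set r0 := List.replicate (max la lb) (0 : Int) with hr0
  have hr0len : r0.length = max la lb := by simp [hr0]
  set r1 := (List.range la).foldl (fun r i => r.set i (g1 i (r.getD i 0))) r0 with hr1
  have hr1len : r1.length = max la lb := by rw [hr1, foldl_set_length, hr0len]
  have h1 : ∀ j, r1.getD j 0 = if j < la then g1 j (r0.getD j 0) else r0.getD j 0 := by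
    intro j
    rw [hr1, foldl_set_getD g1 r0 la (by omega) j]
  apply List.ext_getElem
  · rw [foldl_set_length, hr1len]; simp
  · intro j hj1 hj2
    have hjs : j < max la lb := by
      have h : j < la ∨ j < lb := by simpa using hj2
      omega
    have hr0j : r0.getD j 0 = 0 := by simp [hr0, hjs]
    rw [← List.getD_eq_getElem _ 0 hj1, ← List.getD_eq_getElem _ 0 hj2,
      foldl_set_getD g2 r1 lb (by omega) j, h1 j, hr0j]
    simp only [List.getD_eq_getElem?_getD, List.getElem?_map, List.getElem?_range hjs,
      Option.map_some, Option.getD_some]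
    by_cases hja : j < la <;> by_cases hjb : j < lb <;>
      simp only [hja, hjb, if_pos, if_neg, ite_false, hg1, hg2, f_add, f_sub]
    · rw [zero_add, mod_sub_left]; simp [List.getD_eq_getElem?_getD]
    · rw [zero_add, sub_zero]; simp [List.getD_eq_getElem?_getD]
    · rw [zero_sub]; simp [List.getD_eq_getElem?_getD]
    · omega
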